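-- pv_equiv track=rewrite | github.com/Juliavister/AdvancedAlgorithms1 | Sunday.py | sundaySearch
-- ===== SOURCE A (Python) =====
-- def sundaySearch(pattern, text):
--     matches = []
--     m = len(pattern)
--     n = len(text)
--     skip_table = {}
--     for i in range(m):
--         skip_table[pattern[i]] = m - i
--     i = 0
--     while i <= n - m:
--         j = 0
--         while j < m and (text[i + j] == pattern[j] or pattern[j] == "?"):
--             j += 1
--         if j == m:
--             matches.append(i)
--         if i + m >= n:
--             break
--         if text[i + m] in skip_table:
--             i += skip_table[text[i + m]]
--         else:
--             i += m + 1
--     return matches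
-- ===== SOURCE B (Python) =====
-- def sundaySearch(pattern, text):
--     m = len(pattern)
--     n = len(text)
--     matches = []
--     for i in range(n - m + 1):
--         if all(text[i + j] == pattern[j] or pattern[j] == "?" for j in range(m)):
--             matches.append(i)
--     return matches
-- ===== Notes on version B (the rewrite author's own statement) =====
-- stated objective: simpler
-- what changed: B replaces the Sunday skip-table walk with a plain brute-force matcher: one pass over every window position with an all()-based wildcard check, no skip table and a fixed stride of 1.
-- intended difference: On patterns containing the wildcard '?' that match the text at some position >= 1, A's skip table stores '?' as a literal character, so its Sunday shift can jump over genuine wildcard matches and A returns a list missing match positions (e.g. sundaySearch('a?','zac') = []), while B returns every match position ([1]), which is what a wildcard matcher is meant to return. — e.g. on sundaySearch("a?", "zac"): A returns [], B returns [1]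
import Mathlib
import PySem

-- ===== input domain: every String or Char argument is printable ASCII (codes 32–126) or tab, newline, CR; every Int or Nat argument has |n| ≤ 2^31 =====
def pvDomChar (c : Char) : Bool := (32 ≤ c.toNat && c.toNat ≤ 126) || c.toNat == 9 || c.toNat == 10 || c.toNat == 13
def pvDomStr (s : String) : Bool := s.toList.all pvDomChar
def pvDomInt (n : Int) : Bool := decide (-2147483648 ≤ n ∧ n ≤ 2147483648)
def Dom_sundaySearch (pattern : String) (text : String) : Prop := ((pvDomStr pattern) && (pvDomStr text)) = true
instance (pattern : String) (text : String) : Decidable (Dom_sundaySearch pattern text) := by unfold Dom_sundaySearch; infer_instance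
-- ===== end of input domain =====

-- B replaces A's Sunday skip-table walk by a plain brute-force window scan (stride 1,
-- no skip table); objective: simpler.  A's table stores '?' as a literal, so A's shift
-- can skip genuine wildcard matches at positions ≥ 1 — those inputs are D_, where B's
-- value (all match positions) is the intended one.

-- ===== PORT A =====
-- skip_table built by 'for i in range(m): skip_table[pattern[i]] = m - i'
-- (pattern[i] is always in range here, so pyGetD's default is never used)
def pvA_table (pattern : List Char) : PySem.Dict Char Int :=
  (PySem.List.pyRange 0 (pattern.length : Int) 1).foldl
    (fun d i => d.insert (PySem.List.pyGetD pattern i ' ') ((pattern.length : Int) - i))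
    PySem.Dict.empty

-- inner 'while j < m and (text[i+j] == pattern[j] or pattern[j] == "?")'; the Nat fuel
-- is only a totality guard — fuel = pattern.length + 1 is always sufficient (proved below)
def pvA_jloop (pattern text : List Char) (i : Int) : Nat → Nat → Nat
  | 0, j => j
  | fuel + 1, j =>
    if j < pattern.length ∧
        (PySem.List.pyGet? text (i + (j : Int)) = PySem.List.pyGet? pattern (j : Int) ∨
          PySem.List.pyGet? pattern (j : Int) = some '?') then
      pvA_jloop pattern text i fuel (j + 1)
    else j

-- outer 'while i <= n - m' loop; 'text[i+m] in skip_table' then 'skip_table[text[i+m]]'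
-- ported as contains/getD (the default is unreachable when contains holds); the Nat fuel
-- is only a totality guard — fuel = text.length + 1 is always sufficient (proved below)
def pvA_loop (pattern text : List Char) : Nat → Int → List Int → List Int
  | 0, _, acc => acc
  | fuel + 1, i, acc =>
    if i ≤ (text.length : Int) - (pattern.length : Int) then
      let j := pvA_jloop pattern text i (pattern.length + 1) 0
      let acc' := if j = pattern.length then acc ++ [i] else acc
      if i + (pattern.length : Int) ≥ (text.length : Int) then acc'
      else
        let c := PySem.List.pyGetD text (i + (pattern.length : Int)) ' '
        let s := if (pvA_table pattern).contains c then (pvA_table pattern).getD c 0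
                 else (pattern.length : Int) + 1
        pvA_loop pattern text fuel (i + s) acc'
    else acc

def sundaySearch (pattern : String) (text : String) : List Int :=
  pvA_loop pattern.toList text.toList (text.toList.length + 1) 0 []

-- ===== PORT B =====
-- 'all(text[i+j] == pattern[j] or pattern[j] == "?" for j in range(m))'
def pvB_match (pattern text : List Char) (i : Int) : Bool :=
  (PySem.List.pyRange 0 (pattern.length : Int) 1).all
    (fun j => (PySem.List.pyGet? text (i + j) == PySem.List.pyGet? pattern j) ||
      (PySem.List.pyGet? pattern j == some '?'))

-- 'for i in range(n - m + 1): if all(...): matches.append(i)'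
def sundaySearch_alt (pattern : String) (text : String) : List Int :=
  (PySem.List.pyRange 0 ((text.toList.length : Int) - (pattern.toList.length : Int) + 1) 1).foldl
    (fun acc i => if pvB_match pattern.toList text.toList i then acc ++ [i] else acc) []

-- ===== PRECONDITION & SPEC =====
-- On patterns containing '?' that match the text (wildcard-wise, element by element) at
-- some position ≥ 1, A's skip table stores '?' as a literal character, so its Sunday
-- shift can jump over genuine wildcard matches and A returns a list missing match
-- positions; B returns all match positions, the intended value for a wildcard matcher.
def D_sundaySearch (pattern : String) (text : String) : Prop :=
  '?' ∈ pattern.toList ∧ ∃ i < text.toList.length, 0 < i ∧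
    List.Forall₂ (fun a b => a = '?' ∨ b = a) pattern.toList
      ((text.toList.drop i).take pattern.toList.length)

instance (pattern : String) (text : String) : Decidable (D_sundaySearch pattern text) := by
  unfold D_sundaySearch; infer_instance

def Spec_sundaySearch (pattern : String) (text : String) (out : List Int) : Prop :=
  ¬ D_sundaySearch pattern text → out = sundaySearch_alt pattern text
instance (pattern : String) (text : String) (out : List Int) : Decidable (Spec_sundaySearch pattern text out) := by unfold Spec_sundaySearch; infer_instance

def pvDiffWitness_sundaySearch : String × String := ("a?", "zac")
def pvDiffWitnessOut_sundaySearch : (List Int) × (List Int) := ([], [1])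

-- ===== CLAIM (what is proved, stated in full; the proofs are below) =====
def Claim_unchanged_sundaySearch : Prop := ∀ (pattern : String) (text : String), Dom_sundaySearch pattern text → Spec_sundaySearch pattern text (sundaySearch pattern text)
def Claim_changed_sundaySearch : Prop := Dom_sundaySearch (pvDiffWitness_sundaySearch.1) (pvDiffWitness_sundaySearch.2) ∧ D_sundaySearch (pvDiffWitness_sundaySearch.1) (pvDiffWitness_sundaySearch.2) ∧ sundaySearch (pvDiffWitness_sundaySearch.1) (pvDiffWitness_sundaySearch.2) = pvDiffWitnessOut_sundaySearch.1 ∧ sundaySearch_alt (pvDiffWitness_sundaySearch.1) (pvDiffWitness_sundaySearch.2) = pvDiffWitnessOut_sundaySearch.2 ∧ pvDiffWitnessOut_sundaySearch.1 ≠ pvDiffWitnessOut_sundaySearch.2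

-- ===== LEMMAS AND PROOFS =====

-- every value stored in the skip table is between 1 and m
theorem pvA_table_aux_bounds (p : List Char) (l : List Int) (d : PySem.Dict Char Int)
    (hd : ∀ c v, d.get? c = some v → 1 ≤ v ∧ v ≤ (p.length : Int))
    (hl : ∀ i ∈ l, 0 ≤ i ∧ i ≤ (p.length : Int) - 1) :
    ∀ c v, (l.foldl (fun d i => d.insert (PySem.List.pyGetD p i ' ') ((p.length : Int) - i)) d).get? c
      = some v → 1 ≤ v ∧ v ≤ (p.length : Int) := by
  induction l generalizing d with
  | nil => exact hd
  | cons x xs ih =>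
    intro c v
    simp only [List.foldl_cons]
    refine ih _ ?_ (fun i hi => hl i (List.mem_cons_of_mem _ hi)) c v
    intro c' v' h
    rw [PySem.Dict.get?_insert] at h
    split at h
    · simp only [Option.some.injEq] at h
      have := hl x (List.mem_cons_self)
      omega
    · exact hd c' v' h

theorem pvA_table_bounds (p : List Char) (c : Char) (v : Int)
    (h : (pvA_table p).get? c = some v) : 1 ≤ v ∧ v ≤ (p.length : Int) := by
  refine pvA_table_aux_bounds p _ _ (fun c v h => ?_) (fun i hi => ?_) c v h
  · simp [PySem.Dict.get?_empty] at h
  · have := (PySem.List.mem_pyRange_one).1 hi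
    omega

-- A's step: 1 ≤ s ≤ m + 1
theorem pvA_step_bounds (p : List Char) (c : Char) :
    1 ≤ (if (pvA_table p).contains c then (pvA_table p).getD c 0 else (p.length : Int) + 1) ∧
      (if (pvA_table p).contains c then (pvA_table p).getD c 0 else (p.length : Int) + 1)
        ≤ (p.length : Int) + 1 := by
  split
  · rename_i h
    rw [PySem.Dict.contains_eq_isSome_get?] at h
    obtain ⟨v, hv⟩ := Option.isSome_iff_exists.1 h
    rw [PySem.Dict.getD_eq_get?_getD, hv]
    have := pvA_table_bounds p c v hv
    constructor <;> [exact this.1; simpa using le_trans this.2 (by omega)]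
  · omega

-- skip-table contents: if c occurs in the pattern at index d then c is in the table
-- with a stored value ≤ m - d (last occurrence wins, so the value is m - lastIndex)
theorem pvA_table_occ_aux (p : List Char) (k : Nat) (hk : k ≤ p.length) (c : Char) :
    ∀ d : Nat, d < k → p.getD d ' ' = c →
      ∃ v, ((PySem.List.pyRange 0 (k : Int) 1).foldl
        (fun d i => d.insert (PySem.List.pyGetD p i ' ') ((p.length : Int) - i))
        PySem.Dict.empty).get? c = some v ∧ v ≤ (p.length : Int) - (d : Int) := by
  induction k with
  | zero => intro d hd; omega
  | succ k ih =>
    intro d hd hc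
    have hsplit : PySem.List.pyRange 0 ((k + 1 : Nat) : Int) 1
        = PySem.List.pyRange 0 (k : Int) 1 ++ [(k : Int)] := by
      push_cast
      exact PySem.List.pyRange_one_succ_right (by positivity)
    rw [hsplit, List.foldl_append]
    simp only [List.foldl_cons, List.foldl_nil]
    rw [PySem.Dict.get?_insert]
    have hpk : PySem.List.pyGetD p ((k : Nat) : Int) ' ' = p.getD k ' ' :=
      PySem.List.pyGetD_natCast p k ' '
    by_cases he : p.getD k ' ' = c
    · rw [if_pos (by rw [hpk]; exact he.symm)]
      exact ⟨_, rfl, by omega⟩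
    · rw [if_neg (by rw [hpk]; exact fun h => he h.symm)]
      rcases Nat.lt_succ_iff_lt_or_eq.1 hd with hd' | rfl
      · exact ih (by omega) d hd' hc
      · exact absurd hc he

theorem pvA_table_occ (p : List Char) (c : Char) (d : Nat) (hd : d < p.length)
    (hc : p[d]? = some c) :
    ∃ v, (pvA_table p).get? c = some v ∧ v ≤ (p.length : Int) - (d : Int) := by
  refine pvA_table_occ_aux p p.length le_rfl c d hd ?_
  rw [List.getD_eq_getElem?_getD, hc]; rfl

-- the counting inner while loop reaches m exactly when B's window check succeeds
theorem pv_jloop_iff (p t : List Char) (i : Int) :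
    ∀ (fuel j : Nat), j ≤ p.length → p.length - j < fuel →
      (pvA_jloop p t i fuel j = p.length ↔ ∀ k : Nat, j ≤ k → k < p.length →
        (PySem.List.pyGet? t (i + (k : Int)) = PySem.List.pyGet? p (k : Int) ∨
          PySem.List.pyGet? p (k : Int) = some '?')) := by
  intro fuel
  induction fuel with
  | zero => intro j _ h; omega
  | succ fuel ih =>
    intro j hj hfuel
    by_cases hjl : j = p.length
    · rw [pvA_jloop, if_neg (by omega)]
      constructor
      · intro _ k hk1 hk2; omega
      · intro _; exact hjl
    · have hlt : j < p.length := by omega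
      rw [pvA_jloop]
      by_cases hcond : (PySem.List.pyGet? t (i + (j : Int)) = PySem.List.pyGet? p (j : Int) ∨
          PySem.List.pyGet? p (j : Int) = some '?')
      · rw [if_pos ⟨hlt, hcond⟩, ih (j + 1) (by omega) (by omega)]
        constructor
        · intro h k hk1 hk2
          rcases Nat.eq_or_lt_of_le hk1 with rfl | hk
          · exact hcond
          · exact h k (by omega) hk2
        · intro h k hk1 hk2; exact h k (by omega) hk2
      · rw [if_neg (by tauto)]
        constructor
        · intro h; omega
        · intro h; exact absurd (h j le_rfl hlt) hcond

theorem pv_match_eq (p t : List Char) (i : Int) :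
    (pvA_jloop p t i (p.length + 1) 0 = p.length) ↔ pvB_match p t i = true := by
  rw [pv_jloop_iff p t i (p.length + 1) 0 (by omega) (by omega)]
  unfold pvB_match
  rw [List.all_eq_true]
  constructor
  · intro h j hj
    obtain ⟨hj0, hjl⟩ := (PySem.List.mem_pyRange_one).1 hj
    have hk : j = ((j.toNat : Nat) : Int) := by omega
    have := h j.toNat (by omega) (by omega)
    rw [← hk] at this
    simpa using this
  · intro h k _ hk2
    have := h (k : Int) ((PySem.List.mem_pyRange_one).2 ⟨by positivity, by exact_mod_cast hk2⟩)
    simpa using this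

-- B's Bool window check ↔ the element-wise wildcard match used by D_
theorem pv_bmatch_iff (p t : List Char) (k : Int) (h0 : 0 ≤ k)
    (hn : k ≤ (t.length : Int) - (p.length : Int)) :
    pvB_match p t k = true ↔
      List.Forall₂ (fun a b => a = '?' ∨ b = a) p ((t.drop k.toNat).take p.length) := by
  have hlen : ((t.drop k.toNat).take p.length).length = p.length := by
    rw [List.length_take, List.length_drop]; omega
  rw [List.forall₂_iff_get]
  unfold pvB_match
  rw [List.all_eq_true]
  constructor
  · intro h
    refine ⟨hlen.symm, fun j h1 h2 => ?_⟩
    have hthis := h (j : Int) ((PySem.List.mem_pyRange_one).2 ⟨by positivity, by exact_mod_cast h1⟩)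
    rw [show k + (j : Int) = ((k.toNat + j : Nat) : Int) by omega,
      PySem.List.pyGet?_natCast, PySem.List.pyGet?_natCast] at hthis
    simp only [Bool.or_eq_true, beq_iff_eq] at hthis
    rw [List.getElem?_eq_getElem (show k.toNat + j < t.length by omega),
      List.getElem?_eq_getElem h1] at hthis
    simp only [Option.some.injEq] at hthis
    simp only [List.get_eq_getElem, List.getElem_take, List.getElem_drop]
    tauto
  · rintro ⟨-, h⟩ j hjmem
    obtain ⟨hj0, hjl⟩ := (PySem.List.mem_pyRange_one).1 hjmem
    have h1 : j.toNat < p.length := by omega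
    have hthis := h j.toNat h1 (by omega)
    simp only [List.get_eq_getElem, List.getElem_take, List.getElem_drop] at hthis
    rw [show j = ((j.toNat : Nat) : Int) by omega]
    rw [show k + ((j.toNat : Nat) : Int) = ((k.toNat + j.toNat : Nat) : Int) by omega,
      PySem.List.pyGet?_natCast, PySem.List.pyGet?_natCast]
    simp only [Bool.or_eq_true, beq_iff_eq]
    rw [List.getElem?_eq_getElem (show k.toNat + j.toNat < t.length by omega),
      List.getElem?_eq_getElem h1]
    simp only [Option.some.injEq]
    tauto

-- the safety property of A's Sunday shift: it never jumps over a match position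
def pvSafe (p t : List Char) : Prop :=
  ∀ i k : Int, 0 ≤ i → i < k → k ≤ (t.length : Int) - (p.length : Int) →
    pvB_match p t k = true → i + (p.length : Int) < (t.length : Int) →
    i + (if (pvA_table p).contains (PySem.List.pyGetD t (i + (p.length : Int)) ' ') then
          (pvA_table p).getD (PySem.List.pyGetD t (i + (p.length : Int)) ' ') 0
        else (p.length : Int) + 1) ≤ k

-- given shift safety, A's walk from i collects exactly the match positions ≥ i
theorem pv_loop_eq (p t : List Char) (hsafe : pvSafe p t) :
    ∀ (fuel : Nat) (i : Int) (acc : List Int), 0 ≤ i →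
      ((t.length : Int) - (p.length : Int) - i).toNat < fuel →
      pvA_loop p t fuel i acc
        = acc ++ (PySem.List.pyRange i ((t.length : Int) - (p.length : Int) + 1) 1).filter
            (fun x => pvB_match p t x) := by
  intro fuel
  induction fuel with
  | zero => intro i acc _ h; omega
  | succ fuel ih =>
    intro i acc hi0 hfuel
    rw [pvA_loop]
    by_cases h1 : i ≤ (t.length : Int) - (p.length : Int)
    · rw [if_pos h1]
      rw [PySem.List.pyRange_one_cons (by omega), List.filter_cons]
      by_cases h2 : i + (p.length : Int) ≥ (t.length : Int)
      · simp only [if_pos h2]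
        have hie : i = (t.length : Int) - (p.length : Int) := by omega
        have hnil : PySem.List.pyRange (i + 1) ((t.length : Int) - (p.length : Int) + 1) 1 = [] :=
          PySem.List.pyRange_one_eq_nil (by omega)
        rw [hnil]
        by_cases hm : pvA_jloop p t i (p.length + 1) 0 = p.length
        · have hb : pvB_match p t i = true := (pv_match_eq _ _ _).1 hm
          simp [hm, hb]
        · have hb : pvB_match p t i = false := by
            rw [← Bool.not_eq_true]; exact fun hh => hm ((pv_match_eq _ _ _).2 hh)
          simp [hm, hb]
      · simp only [if_neg h2]
        have hsb := pvA_step_bounds p (PySem.List.pyGetD t (i + (p.length : Int)) ' ')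
        set s := (if (pvA_table p).contains (PySem.List.pyGetD t (i + (p.length : Int)) ' ') then
            (pvA_table p).getD (PySem.List.pyGetD t (i + (p.length : Int)) ' ') 0
          else (p.length : Int) + 1) with hs
        rw [ih (i + s) _ (by omega) (by omega)]
        -- the skipped stretch (i, i+s) contains no match position
        have hskip : ∀ x : Int, i < x → x < i + s →
            x ≤ (t.length : Int) - (p.length : Int) → pvB_match p t x = false := by
          intro x hx1 hx2 hx3
          rw [← Bool.not_eq_true]
          intro hbx
          have := hsafe i x hi0 hx1 hx3 hbx (by omega)
          omega
        have hfil : (PySem.List.pyRange (i + 1) ((t.length : Int) - (p.length : Int) + 1) 1).filter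
              (fun x => pvB_match p t x)
            = (PySem.List.pyRange (i + s) ((t.length : Int) - (p.length : Int) + 1) 1).filter
              (fun x => pvB_match p t x) := by
          by_cases hse : i + s ≤ (t.length : Int) - (p.length : Int) + 1
          · rw [PySem.List.pyRange_one_append (i + 1) (i + s)
                ((t.length : Int) - (p.length : Int) + 1) (by omega) hse, List.filter_append]
            have : (PySem.List.pyRange (i + 1) (i + s) 1).filter (fun x => pvB_match p t x) = [] := by
              rw [List.filter_eq_nil_iff]
              intro x hx
              obtain ⟨hx1, hx2⟩ := (PySem.List.mem_pyRange_one).1 hx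
              simp [hskip x (by omega) hx2 (by omega)]
            rw [this, List.nil_append]
          · have h1' : PySem.List.pyRange (i + s) ((t.length : Int) - (p.length : Int) + 1) 1 = [] :=
              PySem.List.pyRange_one_eq_nil (by omega)
            rw [h1', List.filter_nil, List.filter_eq_nil_iff]
            intro x hx
            obtain ⟨hx1, hx2⟩ := (PySem.List.mem_pyRange_one).1 hx
            simp [hskip x (by omega) (by omega) (by omega)]
        rw [hfil]
        by_cases hm : pvA_jloop p t i (p.length + 1) 0 = p.length
        · have hb : pvB_match p t i = true := (pv_match_eq _ _ _).1 hm
          simp [hm, hb]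
        · have hb : pvB_match p t i = false := by
            rw [← Bool.not_eq_true]; exact fun hh => hm ((pv_match_eq _ _ _).2 hh)
          simp [hm, hb]
    · rw [if_neg h1, PySem.List.pyRange_one_eq_nil (by omega)]
      simp

-- outside D_, A's shift is safe (list-level form)
theorem pv_safe_of_cond (p t : List Char)
    (hcond : ¬('?' ∈ p ∧ ∃ i < t.length, 0 < i ∧
      List.Forall₂ (fun a b => a = '?' ∨ b = a) p ((t.drop i).take p.length))) :
    pvSafe p t := by
  intro i k hi0 hik hkn hbk him
  by_cases hq : '?' ∈ p
  · -- '?' in the pattern: there is no match at a positive position, contradicting hbk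
    exfalso
    have hm1 : 0 < p.length := List.length_pos_of_mem hq
    exact hcond ⟨hq, k.toNat, by omega, by omega, (pv_bmatch_iff p t k (by omega) hkn).1 hbk⟩
  · -- no '?': the classical Sunday-shift safety argument
    by_contra hlt'
    have hsb := pvA_step_bounds p (PySem.List.pyGetD t (i + (p.length : Int)) ' ')
    have hlt : k < i + (if (pvA_table p).contains (PySem.List.pyGetD t (i + (p.length : Int)) ' ')
        then (pvA_table p).getD (PySem.List.pyGetD t (i + (p.length : Int)) ' ') 0
        else (p.length : Int) + 1) := by omega
    -- k lies at most m past i, so text position i+m falls inside k's window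
    have hkim : k ≤ i + (p.length : Int) := by omega
    have hmatch := (pv_bmatch_iff p t k (by omega) hkn).1 hbk
    rw [List.forall₂_iff_get] at hmatch
    have hdm : (i + (p.length : Int) - k).toNat < p.length := by omega
    have hpt := hmatch.2 (i + (p.length : Int) - k).toNat hdm (by omega)
    simp only [List.get_eq_getElem, List.getElem_take, List.getElem_drop] at hpt
    have hin : (i + (p.length : Int)).toNat < t.length := by omega
    have hgd : PySem.List.pyGetD t (i + (p.length : Int)) ' ' = t[(i + (p.length : Int)).toNat] :=
      PySem.List.pyGetD_eq_getElem t ' ' (by omega) (by exact_mod_cast him)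
    have hpc : p[(i + (p.length : Int) - k).toNat]?
        = some (PySem.List.pyGetD t (i + (p.length : Int)) ' ') := by
      rw [List.getElem?_eq_getElem hdm, hgd]
      rcases hpt with h | h
      · exact absurd (h ▸ List.getElem_mem hdm) hq
      · have h2 : t[(i + (p.length : Int)).toNat]?
            = some p[(i + (p.length : Int) - k).toNat] := by
          rw [show (i + (p.length : Int)).toNat
              = k.toNat + (i + (p.length : Int) - k).toNat by omega,
            List.getElem?_eq_getElem
              (show k.toNat + (i + (p.length : Int) - k).toNat < t.length by omega), h]
        rw [List.getElem?_eq_getElem hin] at h2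
        exact (Option.some.inj h2).symm ▸ rfl
    obtain ⟨v, hv, hvle⟩ :=
      pvA_table_occ p (PySem.List.pyGetD t (i + (p.length : Int)) ' ') _ hdm hpc
    have hcont : (pvA_table p).contains (PySem.List.pyGetD t (i + (p.length : Int)) ' ') = true := by
      rw [PySem.Dict.contains_eq_isSome_get?, hv]; rfl
    rw [if_pos hcont, PySem.Dict.getD_eq_get?_getD, hv] at hlt
    simp only [Option.getD_some] at hlt
    omega

theorem pv_safe_of_not_D (pattern text : String)
    (hD : ¬ D_sundaySearch pattern text) : pvSafe pattern.toList text.toList :=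
  pv_safe_of_cond pattern.toList text.toList (by unfold D_sundaySearch at hD; exact hD)

-- ===== VERDICT (by name: the statement is the Claim_ definition above) =====
theorem sundaySearch_spec : Claim_unchanged_sundaySearch := by
  intro pattern text _ hD
  unfold sundaySearch sundaySearch_alt
  rw [pv_loop_eq pattern.toList text.toList (pv_safe_of_not_D pattern text hD)
      (text.toList.length + 1) 0 [] le_rfl (by omega)]
  rw [PySem.List.foldl_append_if_eq_filter]

theorem sundaySearch_changed : Claim_changed_sundaySearch := by
  unfold Claim_changed_sundaySearch; decide
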